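-- pv_equiv track=rewrite | github.com/gerliron18/67101-Introduction-to-Computer-Science | Ex7/ex7.py | no_repetition_sequences_list_with_prefix
-- ===== SOURCE A (Python) =====
-- def no_repetition_sequences_list_with_prefix(prefix, char_list, n):
--     """A function that generate all possible combinations of words
--     in length n by given prefix and given char_list.
--     Will return list of strings"""
--     temp_list = []  # Define temporary list
--     if len(prefix) == n - 1:  # Check if the given prefix is almost in length n
--         for letter in char_list:  # Run along all letters in char_list
--             if letter not in prefix:  # Check if the letter is in the prefix
--                 temp_list.append((prefix + letter))
--                 # Add the prefix eith the letter to the temporary list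
--         return temp_list
--     for letter in char_list:  # Run along all letters in char_list
--         if letter not in prefix:  # Check if the letter is in the prefix
--             temp_list.extend(
--                 no_repetition_sequences_list_with_prefix(prefix + letter,
--                                                          char_list, n))
--             # Extend the temporary list by recursive
--             # call to generate combination
--     return temp_list
-- ===== SOURCE B (Python) =====
-- def no_repetition_sequences_list_with_prefix(prefix, char_list, n):
--     """Iterative re-implementation: explicit DFS stack instead of recursion.
--     Returns the same list, in the same order, as the recursive original."""
--     result = []
--     stack = [prefix]
--     while stack:
--         p = stack.pop()
--         if len(p) == n - 1:
--             for letter in char_list: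
--                 if letter not in p:
--                     result.append(p + letter)
--         else:
--             for letter in reversed(char_list):
--                 if letter not in p:
--                     stack.append(p + letter)
--     return result
-- ===== Notes on version B (the rewrite author's own statement) =====
-- stated objective: alternative
-- what changed: Replaces A's recursive DFS (recursion on the growing prefix, extending a temp list per call) with an iterative explicit-stack loop that pops partial prefixes and appends finished sequences to a single result accumulator, producing the identical list in the identical order.
import Mathlib
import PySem

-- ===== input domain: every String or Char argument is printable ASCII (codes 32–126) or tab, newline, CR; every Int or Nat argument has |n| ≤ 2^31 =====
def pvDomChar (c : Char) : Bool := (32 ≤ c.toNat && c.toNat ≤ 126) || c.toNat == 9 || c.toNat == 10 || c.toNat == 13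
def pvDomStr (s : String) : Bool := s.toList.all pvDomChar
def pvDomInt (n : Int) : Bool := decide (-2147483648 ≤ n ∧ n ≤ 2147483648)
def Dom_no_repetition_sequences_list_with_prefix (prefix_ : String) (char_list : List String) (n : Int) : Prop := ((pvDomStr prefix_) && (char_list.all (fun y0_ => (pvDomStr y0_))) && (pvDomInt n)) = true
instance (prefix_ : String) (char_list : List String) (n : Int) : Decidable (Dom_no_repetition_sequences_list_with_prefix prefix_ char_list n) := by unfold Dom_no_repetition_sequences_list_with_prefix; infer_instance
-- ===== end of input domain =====

-- B replaces A's recursion by an explicit DFS stack loop (iterative, accumulator-based);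
-- objective: alternative decomposition, same output list in the same order.

-- ===== PORT A =====
-- Termination measure shared by both ports: the number of letters of char_list
-- not yet occurring (as a substring, Python's `in`) in the current prefix.
def nrsMeasure (char_list : List String) (p : String) : Nat :=
  (char_list.filter (fun l => !(PySem.Str.isIn l p))).length

-- Python's `letter in prefix` persists when the prefix is extended on the right.
lemma isIn_append_of_isIn (l p x : String) (h : PySem.Str.isIn l p = true) :
    PySem.Str.isIn l (p ++ x) = true := by
  rw [PySem.Str.isIn_iff_infix] at h ⊢
  rw [String.toList_append]
  exact h.trans (List.prefix_append _ _).isInfix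

lemma filter_length_lt {α : Type} (q q' : α → Bool) (xs : List α) (x : α)
    (hx : x ∈ xs) (mono : ∀ a, q' a = true → q a = true)
    (hq : q x = true) (hq' : q' x = false) :
    (xs.filter q').length < (xs.filter q).length := by
  induction xs with
  | nil => cases hx
  | cons y t ih =>
    rcases List.mem_cons.mp hx with rfl | hxt
    · have h1 : (t.filter q').length ≤ (t.filter q).length := by
        simpa [← List.countP_eq_length_filter] using
          List.countP_mono_left (p := q') (q := q) (l := t) (fun a _ h => mono a h)
      simp [hq, hq']
      omega
    · have h1 := ih hxt
      by_cases hq'y : q' y = true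
      · have hqy := mono y hq'y
        simp [hq'y, hqy]
        omega
      · by_cases hqy : q y = true <;>
          simp [hq'y, hqy] <;> omega

-- adding a missing letter strictly decreases the measure
lemma nrsMeasure_append_lt (char_list : List String) (p l : String)
    (hl : l ∈ char_list) (h : PySem.Str.isIn l p = false) :
    nrsMeasure char_list (p ++ l) < nrsMeasure char_list p := by
  unfold nrsMeasure
  refine filter_length_lt _ _ _ l hl ?_ ?_ ?_
  · intro a ha
    cases hin : PySem.Str.isIn a p with
    | false => decide
    | true =>
      rw [isIn_append_of_isIn a p l hin] at ha
      exact absurd ha (by decide)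
  · rw [h]; rfl
  · have hself : PySem.Str.isIn l (p ++ l) = true := by
      rw [PySem.Str.isIn_iff_infix, String.toList_append]
      exact (List.suffix_append _ _).isInfix
    rw [hself]; rfl

mutual
-- literal transliteration of A: the `len(prefix) == n - 1` base loop, else the
-- recursive extend-loop over char_list (attach carries the membership needed for termination)
def no_repetition_sequences_list_with_prefix (prefix_ : String) (char_list : List String) (n : Int) : List String :=
  if PySem.Str.len prefix_ = n - 1 then
    char_list.foldl (fun temp_list letter =>
      if !(PySem.Str.isIn letter prefix_) then temp_list ++ [prefix_ ++ letter] else temp_list) []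
  else
    nrsGoA prefix_ char_list char_list.attach n
termination_by (nrsMeasure char_list prefix_, char_list.length + 1)
decreasing_by
  exact Prod.Lex.right _ (by simp)

-- A's second `for letter in char_list:` loop, one letter per step
def nrsGoA (prefix_ : String) (char_list : List String) (letters : List {x // x ∈ char_list}) (n : Int) : List String :=
  match letters with
  | [] => []
  | letter :: rest =>
    (if !(PySem.Str.isIn letter.val prefix_) then
        no_repetition_sequences_list_with_prefix (prefix_ ++ letter.val) char_list n
      else []) ++ nrsGoA prefix_ char_list rest n
termination_by (nrsMeasure char_list prefix_, letters.length)
decreasing_by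
  · rename_i hh
    rw [Bool.not_eq_true'] at hh
    exact Prod.Lex.left _ _ (nrsMeasure_append_lt char_list prefix_ letter.val letter.property hh)
  · exact Prod.Lex.right _ (by simp)
end

-- ===== PORT B =====
-- Source B's inner loops: the letters of char_list not in p, each appended to p
-- (Python pushes them reversed onto the tail of `stack` and pops from the end;
-- the Lean stack keeps its top at the HEAD, so the same children are consed in
-- char_list order — identical pop order).
def nrsChildren (char_list : List String) (p : String) : List String :=
  (char_list.filter (fun l => !(PySem.Str.isIn l p))).map (fun l => p ++ l)

def nrsWeight (char_list : List String) (p : String) : Nat :=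
  (char_list.length + 1) ^ (nrsMeasure char_list p)

lemma nrsChildren_weight_lt (char_list : List String) (p : String) :
    ((nrsChildren char_list p).map (nrsWeight char_list)).sum < nrsWeight char_list p := by
  by_cases h0 : char_list.filter (fun l => !(PySem.Str.isIn l p)) = []
  · rw [nrsChildren, h0]
    simpa using Nat.one_le_pow _ (char_list.length + 1) (by omega)
  · obtain ⟨k, hm⟩ : ∃ k, nrsMeasure char_list p = k + 1 := by
      have hne : nrsMeasure char_list p ≠ 0 := by
        simpa [nrsMeasure, List.length_eq_zero_iff] using h0
      exact ⟨nrsMeasure char_list p - 1, by omega⟩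
    have hbound : ∀ w ∈ (nrsChildren char_list p).map (nrsWeight char_list),
        w ≤ (char_list.length + 1) ^ k := by
      intro w hw
      rcases List.mem_map.mp hw with ⟨c, hc, rfl⟩
      rcases List.mem_map.mp hc with ⟨l, hl, rfl⟩
      have hl' := List.mem_filter.mp hl
      have hlt := nrsMeasure_append_lt char_list p l hl'.1 (by
        have := hl'.2
        rwa [Bool.not_eq_true'] at this)
      have hk : nrsMeasure char_list (p ++ l) ≤ k := by omega
      exact Nat.pow_le_pow_right (by omega) hk
    have hlen : ((nrsChildren char_list p).map (nrsWeight char_list)).length ≤ char_list.length := by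
      simp only [List.length_map, nrsChildren]
      exact List.length_filter_le _ _
    have hsum : ((nrsChildren char_list p).map (nrsWeight char_list)).sum
        ≤ ((nrsChildren char_list p).map (nrsWeight char_list)).length * (char_list.length + 1) ^ k := by
      simpa [smul_eq_mul] using List.sum_le_card_nsmul _ _ hbound
    calc ((nrsChildren char_list p).map (nrsWeight char_list)).sum
        ≤ char_list.length * (char_list.length + 1) ^ k :=
          le_trans hsum (Nat.mul_le_mul_right _ hlen)
      _ < (char_list.length + 1) * (char_list.length + 1) ^ k :=
          Nat.mul_lt_mul_of_pos_right (by omega) (Nat.pow_pos (by omega))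
      _ = nrsWeight char_list p := by rw [nrsWeight, hm, pow_succ]; ring

-- Source B's `while stack:` loop
def nrsLoop (char_list : List String) (n : Int) (stack : List String) (result : List String) : List String :=
  match stack with
  | [] => result
  | p :: rest =>
    if PySem.Str.len p = n - 1 then
      nrsLoop char_list n rest (result ++ nrsChildren char_list p)
    else
      nrsLoop char_list n (nrsChildren char_list p ++ rest) result
termination_by (stack.map (nrsWeight char_list)).sum
decreasing_by
  · have : 1 ≤ nrsWeight char_list p := Nat.one_le_pow _ _ (by omega)
    simp only [List.map_cons, List.sum_cons]
    omega
  · have := nrsChildren_weight_lt char_list p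
    simp only [List.map_cons, List.map_append, List.sum_cons, List.sum_append]
    omega

def no_repetition_sequences_list_with_prefix_alt (prefix_ : String) (char_list : List String) (n : Int) : List String :=
  nrsLoop char_list n [prefix_] []

-- ===== PRECONDITION & SPEC =====
def Spec_no_repetition_sequences_list_with_prefix (prefix_ : String) (char_list : List String) (n : Int) (out : List String) : Prop := out = no_repetition_sequences_list_with_prefix_alt prefix_ char_list n
instance (prefix_ : String) (char_list : List String) (n : Int) (out : List String) : Decidable (Spec_no_repetition_sequences_list_with_prefix prefix_ char_list n out) := by unfold Spec_no_repetition_sequences_list_with_prefix; infer_instance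

-- ===== CLAIM (what is proved, stated in full; the proofs are below) =====
def Claim_equal_no_repetition_sequences_list_with_prefix : Prop := ∀ (prefix_ : String) (char_list : List String) (n : Int), Dom_no_repetition_sequences_list_with_prefix prefix_ char_list n → Spec_no_repetition_sequences_list_with_prefix prefix_ char_list n (no_repetition_sequences_list_with_prefix prefix_ char_list n)

-- ===== LEMMAS AND PROOFS =====
-- A's recursion, characterised through B's `nrsChildren`
lemma nrsGoA_eq (prefix_ : String) (char_list : List String) (n : Int)
    (letters : List {x // x ∈ char_list}) :
    nrsGoA prefix_ char_list letters n =
      ((letters.map Subtype.val).filter (fun l => !(PySem.Str.isIn l prefix_))).flatMap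
        (fun l => no_repetition_sequences_list_with_prefix (prefix_ ++ l) char_list n) := by
  induction letters with
  | nil => rw [nrsGoA.eq_def]; rfl
  | cons letter rest ih =>
    rw [nrsGoA.eq_def]
    cases h : PySem.Chars.isIn (letter.val).toList prefix_.toList <;>
      simp [h, ih]

lemma A_eq (prefix_ : String) (char_list : List String) (n : Int) :
    no_repetition_sequences_list_with_prefix prefix_ char_list n =
      if PySem.Str.len prefix_ = n - 1 then nrsChildren char_list prefix_
      else (nrsChildren char_list prefix_).flatMap
        (fun c => no_repetition_sequences_list_with_prefix c char_list n) := by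
  rw [no_repetition_sequences_list_with_prefix.eq_def]
  by_cases h : PySem.Str.len prefix_ = n - 1
  · rw [if_pos h, if_pos h, PySem.List.foldl_append_if]
    simp [nrsChildren]
  · rw [if_neg h, if_neg h, nrsGoA_eq, List.attach_map_subtype_val, nrsChildren, List.flatMap_map]

lemma nrsLoop_eq (char_list : List String) (n : Int) (stack result : List String) :
    nrsLoop char_list n stack result =
      result ++ stack.flatMap (fun p => no_repetition_sequences_list_with_prefix p char_list n) := by
  induction stack, result using nrsLoop.induct char_list n with
  | case1 result => simp [nrsLoop]
  | case2 result p rest h ih =>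
    rw [nrsLoop, if_pos h, ih]
    conv_rhs => rw [List.flatMap_cons, A_eq p char_list n]
    rw [if_pos h, List.append_assoc]
  | case3 result p rest h ih =>
    rw [nrsLoop, if_neg h, ih]
    conv_rhs => rw [List.flatMap_cons, A_eq p char_list n]
    rw [if_neg h, List.flatMap_append]

-- ===== VERDICT (by name: the statement is the Claim_ definition above) =====
theorem no_repetition_sequences_list_with_prefix_spec : Claim_equal_no_repetition_sequences_list_with_prefix := by
  intro prefix_ char_list n _
  unfold Spec_no_repetition_sequences_list_with_prefix no_repetition_sequences_list_with_prefix_alt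
  rw [nrsLoop_eq]
  simp
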